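-- pv_equiv track=rewrite | github.com/innovingDevops/addons_custom_sp | l10n_syscoa_payroll/report/amount_to_text_fr.py | _convert_nn_fr
-- ===== SOURCE A (Python) =====
-- to_19_fr = ( 'zéro',  'un',   'deux',  'trois', 'quatre',   'cinq',   'six',
--           'sept', 'huit', 'neuf', 'dix',   'onze', 'douze', 'treize',
--           'quatorze', 'quinze', 'seize', 'dix-sept', 'dix-huit', 'dix-neuf' )
--
-- tens_fr  = ( 'vingt', 'trente', 'quarante', 'Cinquante', 'Soixante', 'Soixante-dix', 'Quatre-vingts', 'Quatre-vingt Dix')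
--
-- def _convert_nn_fr(val):
-- 	if val < 20:
-- 		return to_19_fr[val]
-- 	elif val // 10 == 7 and val % 10 < 7:
-- 		(mod, rem) = (val % 20, val // 10)
-- 		word = tens_fr[rem-3] + '-' + to_19_fr[mod]
-- 		return word
-- 	elif val // 10 == 9 and val % 10 < 7:
-- 		(mod, rem) = (val % 20, val // 10)
-- 		word = tens_fr[rem-3] + '-' + to_19_fr[mod]
-- 		return word
-- 	else:
-- 		for (dcap, dval) in ((k, 20 + (10 * v)) for (v, k) in enumerate(tens_fr)):
-- 			if dval + 10 > val:
-- 				if val % 10: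
-- 					return dcap + '-' + to_19_fr[val % 10]
-- 				return dcap
-- ===== SOURCE B (Python) =====
-- to_19_fr = ( 'zéro',  'un',   'deux',  'trois', 'quatre',   'cinq',   'six',
--           'sept', 'huit', 'neuf', 'dix',   'onze', 'douze', 'treize',
--           'quatorze', 'quinze', 'seize', 'dix-sept', 'dix-huit', 'dix-neuf' )
--
-- tens_fr  = ( 'vingt', 'trente', 'quarante', 'Cinquante', 'Soixante', 'Soixante-dix', 'Quatre-vingts', 'Quatre-vingt Dix')
--
-- def _convert_nn_fr(val):
-- 	if val < 20:
-- 		return to_19_fr[val]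
-- 	units = val % 10
-- 	decade = val // 10
-- 	if decade in (7, 9) and units < 7:
-- 		return tens_fr[decade - 3] + '-' + to_19_fr[val % 20]
-- 	base = tens_fr[decade - 2]
-- 	return base + '-' + to_19_fr[units] if units else base
-- ===== Notes on version B (the rewrite author's own statement) =====
-- stated objective: simpler
-- what changed: B replaces A's special-case cascade plus linear scan over the tens tuple with closed-form index arithmetic (units=val%10, decade=val//10, direct tuple indexing).
-- outside the precondition, e.g. on _convert_nn_fr(100): A returns None, B raises IndexError; on _convert_nn_fr(-21): A raises IndexError, B raises IndexError
import Mathlib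
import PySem

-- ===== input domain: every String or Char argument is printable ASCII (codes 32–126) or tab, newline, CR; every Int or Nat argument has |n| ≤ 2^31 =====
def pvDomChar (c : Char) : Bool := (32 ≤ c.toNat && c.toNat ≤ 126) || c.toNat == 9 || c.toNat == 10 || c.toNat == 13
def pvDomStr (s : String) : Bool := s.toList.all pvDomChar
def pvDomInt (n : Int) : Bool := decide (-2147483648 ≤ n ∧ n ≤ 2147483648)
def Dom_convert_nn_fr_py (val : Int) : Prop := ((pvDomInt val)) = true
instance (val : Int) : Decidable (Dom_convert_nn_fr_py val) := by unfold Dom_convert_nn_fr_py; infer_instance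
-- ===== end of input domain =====

-- ===== PORT A =====
-- B changes: closed-form index arithmetic instead of A's branch cascade + linear scan (objective: simpler).
-- Pre_ restricts to -20 ≤ val ≤ 99: for val ≥ 100 A falls through its loop and returns None
-- (no value of type str), and for val ≤ -21 A raises IndexError.
def pvTo19 : List String :=
  ["zéro", "un", "deux", "trois", "quatre", "cinq", "six",
   "sept", "huit", "neuf", "dix", "onze", "douze", "treize",
   "quatorze", "quinze", "seize", "dix-sept", "dix-huit", "dix-neuf"]

def pvTens : List String :=
  ["vingt", "trente", "quarante", "Cinquante", "Soixante", "Soixante-dix",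
   "Quatre-vingts", "Quatre-vingt Dix"]

-- A's final for-loop over enumerate(tens_fr); "" stands for the fall-through None (outside Pre_)
def pvLoopA (val : Int) : List (Int × String) → String
  | [] => ""
  | (v, dcap) :: rest =>
    if (20 + 10 * v) + 10 > val then
      if PySem.Int.mod val 10 ≠ 0 then
        dcap ++ "-" ++ (PySem.List.pyGet? pvTo19 (PySem.Int.mod val 10)).getD ""
      else dcap
    else pvLoopA val rest

def convert_nn_fr_py (val : Int) : String :=
  if val < 20 then (PySem.List.pyGet? pvTo19 val).getD ""
  else if PySem.Int.floordiv val 10 = 7 ∧ PySem.Int.mod val 10 < 7 then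
    (PySem.List.pyGet? pvTens (PySem.Int.floordiv val 10 - 3)).getD "" ++ "-" ++
      (PySem.List.pyGet? pvTo19 (PySem.Int.mod val 20)).getD ""
  else if PySem.Int.floordiv val 10 = 9 ∧ PySem.Int.mod val 10 < 7 then
    (PySem.List.pyGet? pvTens (PySem.Int.floordiv val 10 - 3)).getD "" ++ "-" ++
      (PySem.List.pyGet? pvTo19 (PySem.Int.mod val 20)).getD ""
  else pvLoopA val (PySem.List.enumerate pvTens)

-- ===== PORT B =====
def convert_nn_fr_py_alt (val : Int) : String :=
  if val < 20 then (PySem.List.pyGet? pvTo19 val).getD ""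
  else
    let units := PySem.Int.mod val 10
    let decade := PySem.Int.floordiv val 10
    if (decade = 7 ∨ decade = 9) ∧ units < 7 then
      (PySem.List.pyGet? pvTens (decade - 3)).getD "" ++ "-" ++
        (PySem.List.pyGet? pvTo19 (PySem.Int.mod val 20)).getD ""
    else
      let base := (PySem.List.pyGet? pvTens (decade - 2)).getD ""
      if units ≠ 0 then base ++ "-" ++ (PySem.List.pyGet? pvTo19 units).getD "" else base

-- ===== PRECONDITION & SPEC =====
-- Pre_ excludes val ≥ 100 (A returns None, not a str) and val ≤ -21 (A raises IndexError).
def Pre_convert_nn_fr_py (val : Int) : Prop := -20 ≤ val ∧ val ≤ 99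
instance (val : Int) : Decidable (Pre_convert_nn_fr_py val) := by unfold Pre_convert_nn_fr_py; infer_instance
def pvWitness_convert_nn_fr_py : Int := (77)
def Spec_convert_nn_fr_py (val : Int) (out : String) : Prop := out = convert_nn_fr_py_alt val
instance (val : Int) (out : String) : Decidable (Spec_convert_nn_fr_py val out) := by unfold Spec_convert_nn_fr_py; infer_instance

-- ===== CLAIM (what is proved, stated in full; the proofs are below) =====
def Claim_equal_convert_nn_fr_py : Prop := ∀ (val : Int), Dom_convert_nn_fr_py val → Pre_convert_nn_fr_py val → Spec_convert_nn_fr_py val (convert_nn_fr_py val)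

-- ===== LEMMAS AND PROOFS =====

-- ===== VERDICT =====
theorem convert_nn_fr_py_spec : Claim_equal_convert_nn_fr_py := by
  intro val _ hpre
  obtain ⟨h1, h2⟩ := hpre
  unfold Spec_convert_nn_fr_py
  interval_cases val <;> rfl
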